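-- pv_equiv track=rewrite | github.com/alexwday/rbc-intel | document_pipeline/src/ingestion/processors/xlsx/table_eda.py | _value_shape
-- ===== SOURCE A (Python) =====
-- def _value_shape(value: str) -> str:
--     """Collapse a value into a simple shape signature. Returns: str."""
--     parts: list[str] = []
--     for char in value.strip():
--         if char.isalpha():
--             token = "A"
--         elif char.isdigit():
--             token = "0"
--         elif char.isspace():
--             token = " "
--         else:
--             token = char
--         if not parts or parts[-1] != token:
--             parts.append(token)
--     return "".join(parts)
-- ===== SOURCE B (Python) =====
-- def _classify(char: str) -> str:
--     if char.isalpha():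
--         return "A"
--     if char.isdigit():
--         return "0"
--     if char.isspace():
--         return " "
--     return char
--
--
-- def _value_shape(value: str) -> str:
--     """Collapse a value into a simple shape signature. Returns: str."""
--     s = value.strip()
--     out = []
--     i, n = 0, len(s)
--     while i < n:
--         token = _classify(s[i])
--         out.append(token)
--         i += 1
--         while i < n and _classify(s[i]) == token:
--             i += 1
--     return "".join(out)
-- ===== Notes on version B (the rewrite author's own statement) =====
-- stated objective: alternative
-- what changed: Replaces A's per-character append-if-last-differs accumulator (which re-reads parts[-1] for every char) with a two-level run-skipping scan: an outer loop that emits one token per run and an inner loop that advances the index past the whole run of characters with the same class, so the output list is never re-inspected.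
import Mathlib
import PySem

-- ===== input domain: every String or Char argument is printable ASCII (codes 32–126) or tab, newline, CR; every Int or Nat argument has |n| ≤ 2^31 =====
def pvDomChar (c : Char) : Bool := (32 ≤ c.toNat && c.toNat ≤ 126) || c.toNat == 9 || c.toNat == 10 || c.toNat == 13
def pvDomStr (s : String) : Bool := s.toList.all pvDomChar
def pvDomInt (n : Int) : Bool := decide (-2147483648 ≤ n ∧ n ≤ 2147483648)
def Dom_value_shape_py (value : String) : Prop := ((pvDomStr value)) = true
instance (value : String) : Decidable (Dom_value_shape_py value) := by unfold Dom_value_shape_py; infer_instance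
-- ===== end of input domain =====

-- B replaces A's per-char append-if-last-differs accumulator with a run-skipping scan
-- (outer loop emits one token per run, inner loop skips the run); alternative, same cost.


-- ===== PORT A =====
-- literal transliteration: fold over the stripped chars with the parts accumulator,
-- appending the token when parts is empty or its last element (parts[-1]) differs
def value_shape_py (value : String) : String :=
  let parts : List Char :=
    (PySem.Str.strip value).toList.foldl
      (fun parts char =>
        let token : Char :=
          if PySem.Chars.isalpha char then 'A'
          else if PySem.Chars.isdigit char then '0'
          else if PySem.Chars.isspace char then ' '
          else char
        if parts = [] ∨ PySem.List.pyGet? parts (-1) ≠ some token then parts ++ [token]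
        else parts)
      []
  String.mk parts

-- ===== PORT B =====
def pvClassify (char : Char) : Char :=
  if PySem.Chars.isalpha char then 'A'
  else if PySem.Chars.isdigit char then '0'
  else if PySem.Chars.isspace char then ' '
  else char

-- B's outer loop emits the class of the run's first char, B's inner index-advancing loop
-- (while classify(s[i]) == token: i += 1) is the dropWhile skipping the rest of the run
def pvRunsB : List Char → List Char
  | [] => []
  | c :: rest =>
    let token := pvClassify c
    token :: pvRunsB (rest.dropWhile (fun d => pvClassify d = token))
termination_by l => l.length
decreasing_by
  have := List.length_dropWhile_le (fun d => decide (pvClassify d = pvClassify c)) rest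
  simp only [List.length_cons]
  omega

def value_shape_py_alt (value : String) : String :=
  String.mk (pvRunsB (PySem.Str.strip value).toList)

-- ===== PRECONDITION & SPEC =====
def Spec_value_shape_py (value : String) (out : String) : Prop := out = value_shape_py_alt value
instance (value : String) (out : String) : Decidable (Spec_value_shape_py value out) := by unfold Spec_value_shape_py; infer_instance

-- ===== CLAIM (what is proved, stated in full; the proofs are below) =====
def Claim_equal_value_shape_py : Prop := ∀ (value : String), Dom_value_shape_py value → Spec_value_shape_py value (value_shape_py value)

-- ===== LEMMAS AND PROOFS =====

/-- A's collapse of a token list, given the previous emitted token (if any). -/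
def pvRuns : Option Char → List Char → List Char
  | _, [] => []
  | p, c :: rest => if p ≠ some c then c :: pvRuns (some c) rest else pvRuns (some c) rest

theorem pvRunsB_nil : pvRunsB [] = [] := by
  rw [pvRunsB]

theorem pvRunsB_cons (c : Char) (rest : List Char) :
    pvRunsB (c :: rest) =
      pvClassify c :: pvRunsB (rest.dropWhile (fun d => pvClassify d = pvClassify c)) := by
  rw [pvRunsB]

theorem pvFoldA_eq_runs (l : List Char) (parts : List Char) :
    l.foldl
      (fun parts char =>
        let token : Char :=
          if PySem.Chars.isalpha char then 'A'
          else if PySem.Chars.isdigit char then '0'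
          else if PySem.Chars.isspace char then ' '
          else char
        if parts = [] ∨ PySem.List.pyGet? parts (-1) ≠ some token then parts ++ [token]
        else parts)
      parts = parts ++ pvRuns parts.getLast? (l.map pvClassify) := by
  induction l generalizing parts with
  | nil => simp [pvRuns]
  | cons c rest ih =>
    simp only [List.foldl_cons, List.map_cons, pvRuns]
    have htok : (if PySem.Chars.isalpha c then 'A'
        else if PySem.Chars.isdigit c then '0'
        else if PySem.Chars.isspace c then ' ' else c) = pvClassify c := rfl
    rw [htok]
    by_cases h : parts.getLast? ≠ some (pvClassify c)
    · have hcond : parts = [] ∨ PySem.List.pyGet? parts (-1) ≠ some (pvClassify c) := by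
        right; rwa [PySem.List.pyGet?_neg_one]
      rw [if_pos hcond, if_pos h, ih]
      simp
    · push_neg at h
      have hne : parts ≠ [] := by
        intro he; rw [he] at h; simp at h
      have hcond : ¬ (parts = [] ∨ PySem.List.pyGet? parts (-1) ≠ some (pvClassify c)) := by
        rw [PySem.List.pyGet?_neg_one]
        push_neg
        exact ⟨hne, h⟩
      rw [if_neg hcond, if_neg (by simp [h] : ¬ parts.getLast? ≠ some (pvClassify c)), ih, h]

/-- A's prev-token collapse of the classified list equals B's run-skipping scan. -/
theorem pvRuns_eq_runsB (l : List Char) :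
    (pvRuns none (l.map pvClassify) = pvRunsB l) ∧
    (∀ t, pvRuns (some t) (l.map pvClassify) =
      pvRunsB (l.dropWhile (fun d => pvClassify d = t))) := by
  induction hl : l.length using Nat.strong_induction_on generalizing l with
  | _ n ih =>
    match l with
    | [] => simp [pvRuns, pvRunsB_nil]
    | c :: rest =>
      have ihr := ih rest.length (by simp [← hl]) rest rfl
      constructor
      · simp only [List.map_cons, pvRuns, pvRunsB_cons]
        rw [if_pos (by simp)]
        exact congrArg _ ((ihr.2) (pvClassify c))
      · intro t
        by_cases h : pvClassify c = t
        · simp only [List.map_cons, pvRuns, List.dropWhile_cons]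
          rw [if_neg (by simp [h]), if_pos (by simp [h]), h]
          exact (ihr.2) t
        · have h1 : pvRuns (some t) (List.map pvClassify (c :: rest)) =
              pvClassify c :: pvRuns (some (pvClassify c)) (List.map pvClassify rest) := by
            simp only [List.map_cons, pvRuns]
            rw [if_pos (by simp; exact fun e => h e.symm)]
          have h2 : List.dropWhile (fun d => decide (pvClassify d = t)) (c :: rest)
              = c :: rest := by
            simp [List.dropWhile_cons, h]
          rw [h1, h2, pvRunsB_cons]
          exact congrArg _ ((ihr.2) (pvClassify c))

-- ===== VERDICT (by name: the statement is the Claim_ definition above) =====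
theorem value_shape_py_spec : Claim_equal_value_shape_py := by
  intro value _
  unfold Spec_value_shape_py value_shape_py value_shape_py_alt
  rw [pvFoldA_eq_runs]
  simp [(pvRuns_eq_runsB _).1]
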